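-- pv_equiv track=rewrite | github.com/spicylemonade/AI_research | scripts/train_baseline.py | parse_symbolic_to_prefix
-- ===== SOURCE A (Python) =====
-- def parse_symbolic_to_prefix(symbolic: str) -> list:
--     """Parse symbolic expression like 'mul(x1, pow(x2, 2))' into prefix token list."""
--
--     def parse_expr(s, pos):
--         # Skip whitespace and commas
--         while pos < len(s) and s[pos] in ' ,':
--             pos += 1
--
--         if pos >= len(s):
--             return [], pos
--
--         # Check if it starts with a letter/digit -> could be function or leaf
--         start = pos
--         while pos < len(s) and (s[pos].isalnum() or s[pos] in '_.-'):
--             pos += 1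
--
--         name = s[start:pos]
--
--         # Skip whitespace
--         while pos < len(s) and s[pos] in ' ':
--             pos += 1
--
--         if pos < len(s) and s[pos] == '(':
--             # Function call
--             pos += 1  # skip (
--             tokens_list = [name]
--
--             # Parse arguments
--             while pos < len(s) and s[pos] != ')':
--                 while pos < len(s) and s[pos] in ' ,':
--                     pos += 1
--                 if pos < len(s) and s[pos] == ')':
--                     break
--                 child_tokens, pos = parse_expr(s, pos)
--                 tokens_list.extend(child_tokens)
--
--             if pos < len(s) and s[pos] == ')':
--                 pos += 1  # skip )
--
--             return tokens_list, pos
--         else: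
--             # Leaf: variable or constant
--             return [name], pos
--
--     result, _ = parse_expr(symbolic, 0)
--     return result
-- ===== SOURCE B (Python) =====
-- def parse_symbolic_to_prefix(symbolic: str) -> list:
--     """Iterative tokenizer: one left-to-right scan with a paren-depth counter.
--
--     At each position we either skip separators, close a parenthesis, or read
--     one token (a maximal run of name characters, possibly followed by spaces
--     and an opening parenthesis).  Parsing stops once the first top-level
--     expression is complete."""
--     s = symbolic
--     n = len(s)
--     tokens = []
--     depth = 0
--     i = 0
--     while i < n:
--         c = s[i]
--         if c in ' ,':
--             i += 1
--         elif c == ')' and depth > 0: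
--             depth -= 1
--             i += 1
--             if depth == 0:
--                 break
--         else:
--             j = i
--             while j < n and (s[j].isalnum() or s[j] in '_.-'):
--                 j += 1
--             name = s[i:j]
--             k = j
--             while k < n and s[k] == ' ':
--                 k += 1
--             if k < n and s[k] == '(':
--                 tokens.append(name)
--                 depth += 1
--                 i = k + 1
--             else:
--                 tokens.append(name)
--                 if depth == 0:
--                     break
--                 i = max(k, i + 1)  # always make progress
--     return tokens
-- ===== Notes on version B (the rewrite author's own statement) =====
-- stated objective: faster
-- what changed: A's recursive-descent parser (mutually recursive parse_expr + argument while-loop) is replaced by a single iterative left-to-right scan that keeps only a paren-depth counter and emits tokens in prefix order (no Python function-call/recursion overhead), stopping when the first top-level expression closes; Pre_ excludes strings with a non-grammar character after an opening parenthesis, on which A's argument loop can stop advancing and loop forever.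
-- outside the precondition, e.g. on parse_symbolic_to_prefix('f(!)'): A does not finish within the time limit, B returns ['f', '']; on parse_symbolic_to_prefix('x(y)!'): A returns ['x', 'y'], B returns ['x', 'y']
import Mathlib
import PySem

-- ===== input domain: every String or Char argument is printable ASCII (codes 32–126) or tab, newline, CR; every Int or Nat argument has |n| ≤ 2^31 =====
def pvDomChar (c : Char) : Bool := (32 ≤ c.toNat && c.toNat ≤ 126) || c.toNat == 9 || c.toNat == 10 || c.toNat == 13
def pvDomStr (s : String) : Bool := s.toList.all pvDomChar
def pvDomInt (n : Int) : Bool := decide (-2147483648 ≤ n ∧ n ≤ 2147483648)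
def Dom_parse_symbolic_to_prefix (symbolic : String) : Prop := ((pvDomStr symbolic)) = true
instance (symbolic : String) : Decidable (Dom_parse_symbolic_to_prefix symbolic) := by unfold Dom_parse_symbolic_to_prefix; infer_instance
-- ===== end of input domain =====

-- B replaces A's recursive descent by a single iterative left-to-right scan with a
-- paren-depth counter (objective: alternative decomposition); return values agree on Pre_.

-- ===== PORT A =====
-- character class of Python's `s[pos].isalnum() or s[pos] in '_.-'`
def isNameChar (c : Char) : Bool := c.isAlphanum || c = '_' || c = '.' || c = '-'

-- `while pos < len(s) and s[pos] in ' ,': pos += 1`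
def skipWS (s : List Char) (pos : Nat) : Nat :=
  if h : pos < s.length ∧ (s.getD pos ' ' = ' ' ∨ s.getD pos ' ' = ',') then
    skipWS s (pos + 1)
  else pos
termination_by s.length - pos
decreasing_by exact Nat.sub_succ_lt_self _ _ h.1

-- `while pos < len(s) and s[pos] in ' ': pos += 1`
def skipSp (s : List Char) (pos : Nat) : Nat :=
  if h : pos < s.length ∧ s.getD pos ' ' = ' ' then skipSp s (pos + 1) else pos
termination_by s.length - pos
decreasing_by exact Nat.sub_succ_lt_self _ _ h.1

-- `while pos < len(s) and (s[pos].isalnum() or s[pos] in '_.-'): pos += 1`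
def nameEnd (s : List Char) (pos : Nat) : Nat :=
  if h : pos < s.length ∧ isNameChar (s.getD pos ' ') = true then nameEnd s (pos + 1) else pos
termination_by s.length - pos
decreasing_by exact Nat.sub_succ_lt_self _ _ h.1

-- A's `parse_expr` and its argument `while` loop, step for step; the fuel only makes the
-- mutual recursion total (A diverges on some inputs outside Pre_) and is generous on Pre_.
mutual
def parseExprA (fuel : Nat) (s : List Char) (pos : Nat) : List String × Nat :=
  match fuel with
  | 0 => ([], pos)
  | f + 1 =>
    let p1 := skipWS s pos
    if p1 < s.length then
      let p2 := nameEnd s p1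
      let name : String := String.ofList ((s.drop p1).take (p2 - p1))
      let p3 := skipSp s p2
      if p3 < s.length ∧ s.getD p3 ' ' = '(' then
        argLoopA f s (p3 + 1) [name]
      else ([name], p3)
    else ([], p1)

def argLoopA (fuel : Nat) (s : List Char) (pos : Nat) (acc : List String) : List String × Nat :=
  match fuel with
  | 0 => (acc, pos)
  | f + 1 =>
    if pos < s.length ∧ s.getD pos ' ' ≠ ')' then
      let p1 := skipWS s pos
      if p1 < s.length ∧ s.getD p1 ' ' = ')' then
        (acc, p1 + 1)                    -- break, then the post-loop `if` consumes ')'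
      else
        let r := parseExprA f s p1
        argLoopA f s r.2 (acc ++ r.1)
    else
      if pos < s.length ∧ s.getD pos ' ' = ')' then (acc, pos + 1) else (acc, pos)
end

def parse_symbolic_to_prefix (symbolic : String) : List String :=
  (parseExprA (2 * symbolic.toList.length + 2) symbolic.toList 0).1

-- ===== PORT B =====
-- termination facts for B's loop (cited in decreasing_by)
theorem skipSp_ge (s : List Char) (pos : Nat) : pos ≤ skipSp s pos := by
  induction pos using skipSp.induct (s := s) with
  | case1 pos h ih => rw [skipSp, dif_pos h]; omega
  | case2 pos h => rw [skipSp, dif_neg h]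

theorem nameEnd_ge (s : List Char) (pos : Nat) : pos ≤ nameEnd s pos := by
  induction pos using nameEnd.induct (s := s) with
  | case1 pos h ih => rw [nameEnd, dif_pos h]; omega
  | case2 pos h => rw [nameEnd, dif_neg h]

-- B: one pass, explicit depth counter, tokens accumulated in prefix order
def bloop (s : List Char) (i depth : Nat) (acc : List String) : List String :=
  if h : i < s.length then
    if s.getD i ' ' = ' ' ∨ s.getD i ' ' = ',' then bloop s (i + 1) depth acc
    else if s.getD i ' ' = ')' ∧ 0 < depth then
      if depth = 1 then acc else bloop s (i + 1) (depth - 1) acc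
    else
      let j := nameEnd s i
      let name : List Char := (s.drop i).take (j - i)
      let k := skipSp s j
      if k < s.length ∧ s.getD k ' ' = '(' then
        bloop s (k + 1) (depth + 1) (acc ++ [String.ofList name])
      else if depth = 0 then acc ++ [String.ofList name]
      else bloop s (max k (i + 1)) depth (acc ++ [String.ofList name])
  else acc
termination_by s.length - i
decreasing_by
  · omega
  · omega
  · have h1 := nameEnd_ge s i
    have h2 := skipSp_ge s (nameEnd s i)
    omega
  · have h1 := nameEnd_ge s i
    have h2 := skipSp_ge s (nameEnd s i)
    omega

def parse_symbolic_to_prefix_alt (symbolic : String) : List String :=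
  bloop symbolic.toList 0 0 []

-- ===== PRECONDITION & SPEC =====
def goodChar (c : Char) : Bool := isNameChar c || c = ' ' || c = ',' || c = '(' || c = ')'

-- Pre_ excludes strings in which a character outside the class alnum/underscore/dot/minus/
-- space/comma/parentheses occurs after an opening parenthesis: on such strings A's argument
-- loop can stop advancing and loop forever (A diverges, e.g. on "f(!)"), while on those of
-- them where A still returns, B returns the same list anyway (e.g. on "x(y)!").
def Pre_parse_symbolic_to_prefix (symbolic : String) : Prop :=
  ∀ i, i < symbolic.toList.length → ∀ j, j < symbolic.toList.length →
    symbolic.toList.getD i ' ' = '(' → i < j → goodChar (symbolic.toList.getD j ' ') = true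
instance (symbolic : String) : Decidable (Pre_parse_symbolic_to_prefix symbolic) := by
  unfold Pre_parse_symbolic_to_prefix; infer_instance

def pvWitness_parse_symbolic_to_prefix : String := "mul(x1, pow(x2, 2))"

def Spec_parse_symbolic_to_prefix (symbolic : String) (out : List String) : Prop := out = parse_symbolic_to_prefix_alt symbolic
instance (symbolic : String) (out : List String) : Decidable (Spec_parse_symbolic_to_prefix symbolic out) := by unfold Spec_parse_symbolic_to_prefix; infer_instance

-- ===== CLAIM (what is proved, stated in full; the proofs are below) =====
def Claim_equal_parse_symbolic_to_prefix : Prop := ∀ (symbolic : String), Dom_parse_symbolic_to_prefix symbolic → Pre_parse_symbolic_to_prefix symbolic → Spec_parse_symbolic_to_prefix symbolic (parse_symbolic_to_prefix symbolic)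

-- ===== LEMMAS AND PROOFS =====

-- "every character from position i on is in the good class"
def Gfrom (s : List Char) (i : Nat) : Prop :=
  ∀ j, i ≤ j → j < s.length → goodChar (s.getD j ' ') = true

theorem Gfrom_mono (s : List Char) {i i' : Nat} (h : Gfrom s i) (hle : i ≤ i') : Gfrom s i' :=
  fun j hj hjl => h j (le_trans hle hj) hjl

theorem skipWS_le (s : List Char) (pos : Nat) (hp : pos ≤ s.length) : skipWS s pos ≤ s.length := by
  induction pos using skipWS.induct (s := s) with
  | case1 pos h ih => rw [skipWS, dif_pos h]; exact ih h.1
  | case2 pos h => rw [skipWS, dif_neg h]; exact hp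

theorem skipWS_ge (s : List Char) (pos : Nat) : pos ≤ skipWS s pos := by
  induction pos using skipWS.induct (s := s) with
  | case1 pos h ih => rw [skipWS, dif_pos h]; omega
  | case2 pos h => rw [skipWS, dif_neg h]

theorem skipWS_stop (s : List Char) (pos : Nat) :
    ¬ (skipWS s pos < s.length ∧ (s.getD (skipWS s pos) ' ' = ' ' ∨ s.getD (skipWS s pos) ' ' = ',')) := by
  induction pos using skipWS.induct (s := s) with
  | case1 pos h ih => rw [skipWS, dif_pos h]; exact ih
  | case2 pos h => rw [skipWS, dif_neg h]; exact h

theorem skipWS_eq (s : List Char) (pos : Nat)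
    (h : ¬ (pos < s.length ∧ (s.getD pos ' ' = ' ' ∨ s.getD pos ' ' = ','))) : skipWS s pos = pos := by
  rw [skipWS, dif_neg h]

theorem skipSp_le (s : List Char) (pos : Nat) (hp : pos ≤ s.length) : skipSp s pos ≤ s.length := by
  induction pos using skipSp.induct (s := s) with
  | case1 pos h ih => rw [skipSp, dif_pos h]; exact ih h.1
  | case2 pos h => rw [skipSp, dif_neg h]; exact hp

theorem skipSp_eq (s : List Char) (pos : Nat)
    (h : ¬ (pos < s.length ∧ s.getD pos ' ' = ' ')) : skipSp s pos = pos := by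
  rw [skipSp, dif_neg h]

theorem nameEnd_le (s : List Char) (pos : Nat) (hp : pos ≤ s.length) : nameEnd s pos ≤ s.length := by
  induction pos using nameEnd.induct (s := s) with
  | case1 pos h ih => rw [nameEnd, dif_pos h]; exact ih h.1
  | case2 pos h => rw [nameEnd, dif_neg h]; exact hp

theorem nameEnd_eq (s : List Char) (pos : Nat)
    (h : ¬ (pos < s.length ∧ isNameChar (s.getD pos ' ') = true)) : nameEnd s pos = pos := by
  rw [nameEnd, dif_neg h]

theorem nameEnd_succ (s : List Char) (pos : Nat)
    (h : pos < s.length ∧ isNameChar (s.getD pos ' ') = true) : nameEnd s pos = nameEnd s (pos + 1) := by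
  rw [nameEnd, dif_pos h]

theorem goodChar_cases {c : Char} (h : goodChar c = true) :
    isNameChar c = true ∨ c = ' ' ∨ c = ',' ∨ c = '(' ∨ c = ')' := by
  simp [goodChar] at h
  tauto

-- B skips ' '/',' one character per loop iteration; A does it with skipWS
theorem bloop_skipWS (s : List Char) (pos d : Nat) (acc : List String) :
    bloop s pos d acc = bloop s (skipWS s pos) d acc := by
  induction pos using skipWS.induct (s := s) with
  | case1 pos h ih =>
    rw [skipWS, dif_pos h, ← ih, bloop, dif_pos h.1, if_pos h.2]
  | case2 pos h => rw [skipWS, dif_neg h]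

-- argLoopA threads its accumulator additively
theorem argLoopA_append (s : List Char) (fuel : Nat) :
    ∀ pos a b, argLoopA fuel s pos (a ++ b) =
      (a ++ (argLoopA fuel s pos b).1, (argLoopA fuel s pos b).2) := by
  induction fuel with
  | zero => intro pos a b; simp [argLoopA]
  | succ f ih =>
    intro pos a b
    rw [argLoopA]
    conv_rhs => rw [argLoopA]
    dsimp only
    split
    · split
      · simp
      · rw [List.append_assoc]
        exact ih _ a _
    · split <;> simp

-- the returned position never moves left and stays in the string
theorem posBounds (s : List Char) (fuel : Nat) :
    (∀ pos, pos ≤ s.length → pos ≤ (parseExprA fuel s pos).2 ∧ (parseExprA fuel s pos).2 ≤ s.length)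
    ∧ (∀ pos acc, pos ≤ s.length → pos ≤ (argLoopA fuel s pos acc).2 ∧ (argLoopA fuel s pos acc).2 ≤ s.length) := by
  induction fuel with
  | zero => exact ⟨fun pos h => by simp [parseExprA, h], fun pos acc h => by simp [argLoopA, h]⟩
  | succ f ih =>
    obtain ⟨ihE, ihA⟩ := ih
    constructor
    · intro pos hp
      rw [parseExprA]
      dsimp only
      have hws1 := skipWS_ge s pos
      have hws2 := skipWS_le s pos hp
      split
      · have hne1 := nameEnd_ge s (skipWS s pos)
        have hne2 := nameEnd_le s (skipWS s pos) hws2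
        have hsp1 := skipSp_ge s (nameEnd s (skipWS s pos))
        have hsp2 := skipSp_le s (nameEnd s (skipWS s pos)) hne2
        split
        · rename_i hpar
          have := ihA (skipSp s (nameEnd s (skipWS s pos)) + 1)
            [String.ofList ((s.drop (skipWS s pos)).take (nameEnd s (skipWS s pos) - skipWS s pos))]
            (by omega)
          refine ⟨?_, ?_⟩ <;> (try simp) <;> omega
        · refine ⟨?_, ?_⟩ <;> (try simp) <;> omega
      · refine ⟨?_, ?_⟩ <;> (try simp) <;> omega
    · intro pos acc hp
      rw [argLoopA]
      dsimp only
      have hws1 := skipWS_ge s pos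
      have hws2 := skipWS_le s pos hp
      split
      · split
        · rename_i h2
          refine ⟨?_, ?_⟩ <;> (try simp) <;> omega
        · have hE := ihE (skipWS s pos) hws2
          have hA := ihA (parseExprA f s (skipWS s pos)).2 (acc ++ (parseExprA f s (skipWS s pos)).1) hE.2
          refine ⟨?_, ?_⟩ <;> (try simp) <;> omega
      · split
        · refine ⟨?_, ?_⟩ <;> (try simp) <;> omega
        · refine ⟨?_, ?_⟩ <;> (try simp) <;> omega

-- on a good non-')' character, parse_expr consumes at least one character
theorem parseExprA_advance (s : List Char) (fuel : Nat) (pos : Nat) (hf : 1 ≤ fuel)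
    (hlt : pos < s.length) (hid : skipWS s pos = pos)
    (hg : goodChar (s.getD pos ' ') = true) (hnr : s.getD pos ' ' ≠ ')') :
    pos < (parseExprA fuel s pos).2 := by
  obtain ⟨f, rfl⟩ : ∃ f, fuel = f + 1 := ⟨fuel - 1, by omega⟩
  rw [parseExprA]
  dsimp only
  rw [hid]
  rw [if_pos hlt]
  have hle : pos ≤ s.length := le_of_lt hlt
  rcases goodChar_cases hg with hn | hc | hc | hc | hc
  · -- name character: nameEnd moves
    have hstep : nameEnd s pos = nameEnd s (pos + 1) := nameEnd_succ s pos ⟨hlt, hn⟩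
    have h1 : pos + 1 ≤ nameEnd s pos := by rw [hstep]; exact nameEnd_ge s (pos + 1)
    have h2 := skipSp_ge s (nameEnd s pos)
    split
    · rename_i hpar
      have := (posBounds s f).2 (skipSp s (nameEnd s pos) + 1)
        [String.ofList ((s.drop pos).take (nameEnd s pos - pos))] (by omega)
      omega
    · omega
  · exact absurd hc (by intro he; exact (skipWS_stop s pos) (by rw [hid]; exact ⟨hlt, Or.inl he⟩))
  · exact absurd hc (by intro he; exact (skipWS_stop s pos) (by rw [hid]; exact ⟨hlt, Or.inr he⟩))
  · -- '(' : nameEnd = pos, skipSp = pos, function branch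
    have hne : nameEnd s pos = pos := nameEnd_eq s pos (by rw [hc]; simp [isNameChar])
    have hsp : skipSp s (nameEnd s pos) = pos := by rw [hne]; exact skipSp_eq s pos (by rw [hc]; simp)
    rw [hsp]
    rw [if_pos ⟨hlt, hc⟩]
    have := (posBounds s f).2 (pos + 1)
      [String.ofList ((s.drop pos).take (nameEnd s pos - pos))] (by omega)
    omega
  · exact absurd hc hnr

-- the heart of the proof: B's flat loop simulates A's mutual recursion
theorem mainEA (s : List Char) (fuel : Nat) :
    (∀ pos d acc, pos ≤ s.length → Gfrom s pos → 1 ≤ d → 2 * (s.length - pos) + 1 ≤ fuel →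
      (skipWS s pos < s.length → s.getD (skipWS s pos) ' ' ≠ ')') →
      bloop s pos d acc = bloop s (parseExprA fuel s pos).2 d (acc ++ (parseExprA fuel s pos).1))
    ∧ (∀ pos d acc, pos ≤ s.length → Gfrom s pos → 1 ≤ d → 2 * (s.length - pos) + 2 ≤ fuel →
      bloop s pos d acc = if d = 1 then (argLoopA fuel s pos acc).1
        else bloop s (argLoopA fuel s pos acc).2 (d - 1) (argLoopA fuel s pos acc).1) := by
  induction fuel with
  | zero =>
    constructor
    · intro pos d acc _ _ _ hf
      exact absurd hf (by omega)
    · intro pos d acc _ _ _ hf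
      exact absurd hf (by omega)
  | succ f ih =>
    obtain ⟨ihE, ihA⟩ := ih
    constructor
    · -- parse_expr step
      intro pos d acc hp hg hd hf hnr
      rw [bloop_skipWS s pos d acc, parseExprA]
      dsimp only
      by_cases h1 : skipWS s pos < s.length
      · rw [if_pos h1]
        have hge1 := skipWS_ge s pos
        have hnr' := hnr h1
        have hgp1 : goodChar (s.getD (skipWS s pos) ' ') = true := hg _ hge1 h1
        have hws : ¬ (s.getD (skipWS s pos) ' ' = ' ' ∨ s.getD (skipWS s pos) ' ' = ',') :=
          fun hw => skipWS_stop s pos ⟨h1, hw⟩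
        have hge2 := nameEnd_ge s (skipWS s pos)
        have hle2 := nameEnd_le s (skipWS s pos) (le_of_lt h1)
        have hge3 := skipSp_ge s (nameEnd s (skipWS s pos))
        by_cases h2 : skipSp s (nameEnd s (skipWS s pos)) < s.length ∧
            s.getD (skipSp s (nameEnd s (skipWS s pos))) ' ' = '('
        · rw [if_pos h2]
          rw [bloop, dif_pos h1, if_neg hws, if_neg (fun hx => hnr' hx.1)]
          dsimp only
          rw [if_pos h2]
          have hstep := ihA (skipSp s (nameEnd s (skipWS s pos)) + 1) (d + 1)
            (acc ++ [String.ofList ((s.drop (skipWS s pos)).take (nameEnd s (skipWS s pos) - skipWS s pos))])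
            (by omega) (Gfrom_mono s hg (by omega)) (by omega) (by omega)
          rw [hstep, if_neg (by omega : ¬ d + 1 = 1)]
          rw [argLoopA_append s f (skipSp s (nameEnd s (skipWS s pos)) + 1) acc
            [String.ofList ((s.drop (skipWS s pos)).take (nameEnd s (skipWS s pos) - skipWS s pos))]]
          simp only [Nat.add_sub_cancel]
        · rw [if_neg h2]
          rw [bloop, dif_pos h1, if_neg hws, if_neg (fun hx => hnr' hx.1)]
          dsimp only
          rw [if_neg h2, if_neg (by omega : ¬ d = 0)]
          -- under Pre_, the name here is nonempty, so max k (i+1) = k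
          have hadv : skipWS s pos + 1 ≤ nameEnd s (skipWS s pos) := by
            rcases goodChar_cases hgp1 with hc | hc | hc | hc | hc
            · have h1' : nameEnd s (skipWS s pos) = nameEnd s (skipWS s pos + 1) :=
                nameEnd_succ s _ ⟨h1, hc⟩
              have h2' := nameEnd_ge s (skipWS s pos + 1)
              omega
            · exact absurd (Or.inl hc) hws
            · exact absurd (Or.inr hc) hws
            · exfalso
              apply h2
              have hne : nameEnd s (skipWS s pos) = skipWS s pos :=
                nameEnd_eq s _ (by rw [hc]; simp [isNameChar])
              have hsp : skipSp s (nameEnd s (skipWS s pos)) = skipWS s pos := by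
                rw [hne]; exact skipSp_eq s _ (by rw [hc]; simp)
              rw [hsp]
              exact ⟨h1, hc⟩
            · exact absurd hc hnr'
          have hmax : max (skipSp s (nameEnd s (skipWS s pos))) (skipWS s pos + 1)
              = skipSp s (nameEnd s (skipWS s pos)) := by omega
          rw [hmax]
      · rw [if_neg h1]
        simp
    · -- argument-loop step
      intro pos d acc hp hg hd hf
      rw [argLoopA]
      dsimp only
      by_cases hC : pos < s.length ∧ s.getD pos ' ' ≠ ')'
      · rw [if_pos hC]
        have hge1 := skipWS_ge s pos
        by_cases hB : skipWS s pos < s.length ∧ s.getD (skipWS s pos) ' ' = ')'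
        · rw [if_pos hB]
          rw [bloop_skipWS s pos d acc, bloop, dif_pos hB.1,
            if_neg (fun hw => skipWS_stop s pos ⟨hB.1, hw⟩), if_pos ⟨hB.2, by omega⟩]
        · rw [if_neg hB]
          try dsimp only
          by_cases hl : skipWS s pos < s.length
          · have hnr' : s.getD (skipWS s pos) ' ' ≠ ')' := fun he => hB ⟨hl, he⟩
            have hid : skipWS s (skipWS s pos) = skipWS s pos :=
              skipWS_eq s _ (skipWS_stop s pos)
            have hE := ihE (skipWS s pos) d acc (le_of_lt hl)
              (Gfrom_mono s hg hge1) hd (by omega)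
              (fun hlt => by rw [hid]; exact hnr')
            have hadv := parseExprA_advance s f (skipWS s pos) (by omega) hl hid
              (hg _ hge1 hl) hnr'
            have hb1 := (posBounds s f).1 (skipWS s pos) (le_of_lt hl)
            have hA := ihA (parseExprA f s (skipWS s pos)).2 d
              (acc ++ (parseExprA f s (skipWS s pos)).1)
              hb1.2 (Gfrom_mono s hg (by omega)) hd (by omega)
            rw [bloop_skipWS s pos d acc, hE, hA]
          · have hEOF : ¬ skipWS s pos < s.length := hl
            obtain ⟨g, rfl⟩ : ∃ g, f = g + 1 := ⟨f - 1, by omega⟩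
            have hpe : parseExprA (g + 1) s (skipWS s pos) = ([], skipWS s pos) := by
              rw [parseExprA]
              dsimp only
              rw [skipWS_eq s _ (fun hw => hEOF hw.1), if_neg hEOF]
            rw [hpe]
            have hal : argLoopA (g + 1) s (skipWS s pos) (acc ++ []) = (acc ++ [], skipWS s pos) := by
              rw [argLoopA]
              dsimp only
              rw [if_neg (fun hw => hEOF hw.1), if_neg (fun hw => hEOF hw.1)]
            rw [hal]
            rw [bloop_skipWS s pos d acc, bloop, dif_neg hEOF]
            by_cases hd1 : d = 1
            · simp [hd1]
            · rw [if_neg hd1]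
              rw [bloop, dif_neg hEOF]
              simp
      · rw [if_neg hC]
        by_cases hD : pos < s.length ∧ s.getD pos ' ' = ')'
        · rw [if_pos hD]
          rw [bloop, dif_pos hD.1, if_neg (by rw [hD.2]; decide), if_pos ⟨hD.2, by omega⟩]
        · rw [if_neg hD]
          have hEOF : ¬ pos < s.length := by
            intro hlt
            by_cases he : s.getD pos ' ' = ')'
            · exact hD ⟨hlt, he⟩
            · exact hC ⟨hlt, he⟩
          rw [bloop, dif_neg hEOF]
          by_cases hd1 : d = 1
          · simp [hd1]
          · rw [if_neg hd1]
            rw [bloop, dif_neg hEOF]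

-- top level: depth 0, one expression, Pre_ supplies goodness after each '('
theorem topLemma (s : List Char) (hpre : ∀ i, i < s.length → ∀ j, j < s.length →
      s.getD i ' ' = '(' → i < j → goodChar (s.getD j ' ') = true)
    (fuel pos : Nat) (acc : List String) (hp : pos ≤ s.length)
    (hf : 2 * (s.length - pos) + 1 ≤ fuel) :
    bloop s pos 0 acc = acc ++ (parseExprA fuel s pos).1 := by
  obtain ⟨f, rfl⟩ : ∃ f, fuel = f + 1 := ⟨fuel - 1, by omega⟩
  rw [bloop_skipWS s pos 0 acc, parseExprA]
  dsimp only
  by_cases h1 : skipWS s pos < s.length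
  · rw [if_pos h1]
    have hge1 := skipWS_ge s pos
    have hge2 := nameEnd_ge s (skipWS s pos)
    have hge3 := skipSp_ge s (nameEnd s (skipWS s pos))
    have hws : ¬ (s.getD (skipWS s pos) ' ' = ' ' ∨ s.getD (skipWS s pos) ' ' = ',') :=
      fun hw => skipWS_stop s pos ⟨h1, hw⟩
    by_cases h2 : skipSp s (nameEnd s (skipWS s pos)) < s.length ∧
        s.getD (skipSp s (nameEnd s (skipWS s pos))) ' ' = '('
    · rw [if_pos h2]
      rw [bloop, dif_pos h1, if_neg hws, if_neg (by simp : ¬ (s.getD (skipWS s pos) ' ' = ')' ∧ 0 < 0))]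
      dsimp only
      rw [if_pos h2]
      have hgk : Gfrom s (skipSp s (nameEnd s (skipWS s pos)) + 1) :=
        fun j hj hjl => hpre _ h2.1 j hjl h2.2 (by omega)
      have hstep := (mainEA s f).2 (skipSp s (nameEnd s (skipWS s pos)) + 1) 1
        (acc ++ [String.ofList ((s.drop (skipWS s pos)).take (nameEnd s (skipWS s pos) - skipWS s pos))])
        (by omega) hgk (le_refl 1) (by omega)
      rw [hstep, if_pos rfl]
      rw [argLoopA_append s f (skipSp s (nameEnd s (skipWS s pos)) + 1) acc
        [String.ofList ((s.drop (skipWS s pos)).take (nameEnd s (skipWS s pos) - skipWS s pos))]]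
    · rw [if_neg h2]
      rw [bloop, dif_pos h1, if_neg hws, if_neg (by simp : ¬ (s.getD (skipWS s pos) ' ' = ')' ∧ 0 < 0))]
      dsimp only
      rw [if_neg h2, if_pos rfl]
  · rw [if_neg h1]
    rw [bloop, dif_neg h1]
    simp

-- ===== VERDICT (by name: the statement is the Claim_ definition above) =====
theorem parse_symbolic_to_prefix_spec : Claim_equal_parse_symbolic_to_prefix := by
  intro symbolic _ hpre
  unfold Spec_parse_symbolic_to_prefix parse_symbolic_to_prefix parse_symbolic_to_prefix_alt
  have := topLemma symbolic.toList hpre (2 * symbolic.toList.length + 2) 0 []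
    (Nat.zero_le _) (by omega)
  simpa using this.symm
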